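-- pv_equiv track=rewrite | github.com/LucasMagnum/coding-challenges | python/daily_interview_pro/2021/01/19.py | solution
-- ===== SOURCE A (Python) =====
-- def solution(array):
--     bonuses = [1] * len(array)
--
--     for idx, item in enumerate(array):
--         if idx > 0 and item > array[idx - 1]:
--             bonuses[idx] += 1
--
--         if idx < len(array) - 1 and item > array[idx + 1]:
--             bonuses[idx] += 1
--
--     return bonuses
-- ===== SOURCE B (Python) =====
-- def solution(array):
--     # Edge-centric single pass: each adjacent pair awards +1 to its strictly larger endpoint.
--     bonuses = [1] * len(array)
--     for i in range(len(array) - 1):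
--         a, b = array[i], array[i + 1]
--         if a > b:
--             bonuses[i] += 1
--         elif b > a:
--             bonuses[i + 1] += 1
--     return bonuses
-- ===== Notes on version B (the rewrite author's own statement) =====
-- stated objective: alternative
-- what changed: Replaces A's vertex-centric pass (each index checks both its neighbours, up to two conditional increments per index) by an edge-centric pass over adjacent pairs that awards each comparison once to its strictly larger endpoint.
import Mathlib
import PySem

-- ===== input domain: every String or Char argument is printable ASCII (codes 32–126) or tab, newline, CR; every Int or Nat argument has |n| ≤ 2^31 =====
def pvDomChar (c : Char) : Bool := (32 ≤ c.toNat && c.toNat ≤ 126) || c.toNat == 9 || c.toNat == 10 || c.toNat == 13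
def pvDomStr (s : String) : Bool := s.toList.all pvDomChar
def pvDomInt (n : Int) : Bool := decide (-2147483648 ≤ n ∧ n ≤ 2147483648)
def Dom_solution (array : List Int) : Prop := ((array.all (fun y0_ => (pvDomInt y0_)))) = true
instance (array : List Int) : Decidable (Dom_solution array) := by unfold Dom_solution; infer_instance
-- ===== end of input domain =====

-- B replaces A's vertex-centric pass (each index checks both neighbours) by an edge-centric pass
-- over adjacent pairs that awards each comparison to its strictly larger endpoint (alternative decomposition).

-- ===== PORT A =====
def solution (array : List Int) : List Int :=
  (PySem.List.enumerate array).foldl (fun bonuses p =>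
    let idx := p.1
    let item := p.2
    let bonuses :=
      if idx > 0 ∧ item > PySem.List.pyGetD array (idx - 1) 0 then
        PySem.List.pySetD bonuses idx (PySem.List.pyGetD bonuses idx 0 + 1)
      else bonuses
    if idx < PySem.List.len array - 1 ∧ item > PySem.List.pyGetD array (idx + 1) 0 then
      PySem.List.pySetD bonuses idx (PySem.List.pyGetD bonuses idx 0 + 1)
    else bonuses)
    (List.replicate array.length 1)

-- ===== PORT B =====
def solution_alt (array : List Int) : List Int :=
  (PySem.List.pyRange 0 (PySem.List.len array - 1) 1).foldl (fun bonuses i =>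
    let a := PySem.List.pyGetD array i 0
    let b := PySem.List.pyGetD array (i + 1) 0
    if a > b then
      PySem.List.pySetD bonuses i (PySem.List.pyGetD bonuses i 0 + 1)
    else if b > a then
      PySem.List.pySetD bonuses (i + 1) (PySem.List.pyGetD bonuses (i + 1) 0 + 1)
    else bonuses)
    (List.replicate array.length 1)

-- ===== PRECONDITION & SPEC =====
def Spec_solution (array : List Int) (out : List Int) : Prop := out = solution_alt array
instance (array : List Int) (out : List Int) : Decidable (Spec_solution array out) := by unfold Spec_solution; infer_instance

-- ===== CLAIM (what is proved, stated in full; the proofs are below) =====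
def Claim_equal_solution : Prop := ∀ (array : List Int), Dom_solution array → Spec_solution array (solution array)

-- ===== LEMMAS AND PROOFS =====

-- increment position j (always in range in our uses)
def pinc (bs : List Int) (j : Nat) : List Int := bs.set j (bs.getD j 0 + 1)

-- the positions incremented by A at index j
def uA (array : List Int) (j : Nat) : List Nat :=
  (if 0 < j ∧ array.getD (j - 1) 0 < array.getD j 0 then [j] else []) ++
  (if j < array.length - 1 ∧ array.getD (j + 1) 0 < array.getD j 0 then [j] else [])

-- the positions incremented by B at edge j
def uB (array : List Int) (j : Nat) : List Nat :=
  (if array.getD (j + 1) 0 < array.getD j 0 then [j] else []) ++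
  (if array.getD j 0 < array.getD (j + 1) 0 then [j + 1] else [])

lemma length_pinc (bs : List Int) (j : Nat) : (pinc bs j).length = bs.length := by
  simp [pinc]

lemma getD_pinc (bs : List Int) (j i : Nat) (h : j < bs.length) :
    (pinc bs j).getD i 0 = bs.getD i 0 + if j = i then 1 else 0 := by
  unfold pinc
  by_cases hi : i < bs.length
  · rw [List.getD_eq_getElem _ _ (by simpa using hi), List.getD_eq_getElem _ _ hi,
      List.getElem_set]
    split_ifs with hji
    · subst hji; rw [List.getD_eq_getElem _ _ h]
    · omega
  · have h1 : bs.length ≤ i := by omega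
    rw [List.getD_eq_default _ _ (by simpa using h1), List.getD_eq_default _ _ h1]
    rw [if_neg (by omega)]; ring

lemma length_foldl_pinc (U : List Nat) (bs : List Int) :
    (List.foldl pinc bs U).length = bs.length := by
  induction U generalizing bs with
  | nil => rfl
  | cons j U ih => simp [List.foldl_cons, ih, length_pinc]

lemma getD_foldl_pinc (U : List Nat) (bs : List Int) (i : Nat)
    (hU : ∀ j ∈ U, j < bs.length) :
    (List.foldl pinc bs U).getD i 0 = bs.getD i 0 + (U.count i : Int) := by
  induction U generalizing bs with
  | nil => simp
  | cons j U ih =>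
    rw [List.foldl_cons, ih _ (fun k hk => by
      rw [length_pinc]; exact hU k (List.mem_cons_of_mem _ hk))]
    rw [getD_pinc _ _ _ (hU j (List.mem_cons_self))]
    rw [List.count_cons]
    by_cases hji : j = i
    · simp [hji]; ring
    · simp [hji, (by simpa using hji : ¬ (j == i) = true)]

lemma solution_eq_foldl (array : List Int) :
    solution array =
      List.foldl pinc (List.replicate array.length 1)
        ((List.range array.length).flatMap (uA array)) := by
  unfold solution
  rw [PySem.List.enumerate_eq_map_pyRange array 0]
  rw [List.foldl_flatMap]
  simp only [PySem.List.len_eq, PySem.List.pyRange_zero_natCast, List.foldl_map]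
  apply PySem.List.foldl_congr_mem
  intro acc j hj
  simp only [List.mem_range] at hj
  simp only [PySem.List.pyGetD_natCast]
  have e1 : ((j : Int) > 0 ∧
      array.getD j 0 > PySem.List.pyGetD array ((j : Int) - 1) 0) ↔
      (0 < j ∧ array.getD (j - 1) 0 < array.getD j 0) := by
    constructor
    · rintro ⟨h, h2⟩
      have hj0 : 0 < j := by exact_mod_cast h
      refine ⟨hj0, ?_⟩
      have e : ((j : Int) - 1) = ((j - 1 : Nat) : Int) := by omega
      rw [e, PySem.List.pyGetD_natCast] at h2
      exact h2
    · rintro ⟨h, h2⟩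
      have e : ((j : Int) - 1) = ((j - 1 : Nat) : Int) := by omega
      refine ⟨by exact_mod_cast h, ?_⟩
      rw [e, PySem.List.pyGetD_natCast]
      exact h2
  have e2 : ((j : Int) < (array.length : Int) - 1 ∧
      array.getD j 0 > PySem.List.pyGetD array ((j : Int) + 1) 0) ↔
      (j < array.length - 1 ∧ array.getD (j + 1) 0 < array.getD j 0) := by
    have e : ((j : Int) + 1) = ((j + 1 : Nat) : Int) := by push_cast; ring
    rw [e, PySem.List.pyGetD_natCast]
    constructor
    · rintro ⟨h, h2⟩; exact ⟨by omega, h2⟩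
    · rintro ⟨h, h2⟩; exact ⟨by omega, h2⟩
  simp only [e1, e2, uA]
  split_ifs <;>
    simp [pinc, PySem.List.pySetD_natCast]

lemma alt_eq_foldl (array : List Int) :
    solution_alt array =
      List.foldl pinc (List.replicate array.length 1)
        ((List.range (array.length - 1)).flatMap (uB array)) := by
  match array with
  | [] => decide
  | x :: xs =>
    unfold solution_alt
    have e0 : PySem.List.len (x :: xs) - 1 = (((x :: xs).length - 1 : Nat) : Int) := by
      simp [PySem.List.len_eq]
    rw [e0, PySem.List.pyRange_zero_natCast, List.foldl_map, List.foldl_flatMap]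
    apply PySem.List.foldl_congr_mem
    intro acc j hj
    simp only [List.mem_range] at hj
    have e : ((j : Int) + 1) = ((j + 1 : Nat) : Int) := by push_cast; ring
    simp only [e, PySem.List.pyGetD_natCast, PySem.List.pySetD_natCast, uB]
    by_cases hab : (x :: xs).getD (j + 1) 0 < (x :: xs).getD j 0
    · rw [if_pos hab, if_pos hab,
        if_neg (show ¬ (x :: xs).getD j 0 < (x :: xs).getD (j + 1) 0 from by omega)]
      simp [pinc]
    · rw [if_neg hab, if_neg hab]
      by_cases hba : (x :: xs).getD j 0 < (x :: xs).getD (j + 1) 0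
      · rw [if_pos hba, if_pos hba]
        simp [pinc]
      · rw [if_neg hba, if_neg hba]
        simp

lemma mem_uA (array : List Int) (x j : Nat) (h : j ∈ uA array x) : j = x := by
  simp only [uA, List.mem_append] at h
  rcases h with h | h <;> split_ifs at h <;> simp_all

lemma mem_uB (array : List Int) (x j : Nat) (h : j ∈ uB array x) : j = x ∨ j = x + 1 := by
  simp only [uB, List.mem_append] at h
  rcases h with h | h <;> split_ifs at h <;> simp_all

lemma sum_map_point (n k c : Nat) :
    ((List.range n).map (fun j => if j = k then c else 0)).sum = if k < n then c else 0 := by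
  induction n with
  | zero => simp
  | succ n ih =>
    rw [List.range_succ, List.map_append, List.sum_append, ih]
    by_cases h : n = k <;> by_cases h' : k < n <;> simp [h, h'] <;> omega

lemma sum_map_point' (m k c : Nat) :
    ((List.range m).map (fun j => if j + 1 = k then c else 0)).sum
      = if 0 < k ∧ k - 1 < m then c else 0 := by
  induction m with
  | zero => simp
  | succ m ih =>
    rw [List.range_succ, List.map_append, List.sum_append, ih]
    by_cases h : m + 1 = k <;> by_cases h' : 0 < k ∧ k - 1 < m <;>
      simp [h, h'] <;> omega

lemma count_uA (array : List Int) (i j : Nat) :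
    (uA array j).count i =
      if j = i then
        ((if 0 < i ∧ array.getD (i - 1) 0 < array.getD i 0 then 1 else 0) +
         (if i < array.length - 1 ∧ array.getD (i + 1) 0 < array.getD i 0 then 1 else 0))
      else 0 := by
  by_cases h : j = i
  · subst h; simp [uA, List.count_append]; split_ifs <;> simp
  · simp only [uA, List.count_append, if_neg h]
    split_ifs <;> simp_all

lemma count_uB (array : List Int) (i j : Nat) :
    (uB array j).count i =
      (if j = i then (if array.getD (i + 1) 0 < array.getD i 0 then 1 else 0) else 0) +
      (if j + 1 = i then (if array.getD (i - 1) 0 < array.getD i 0 then 1 else 0) else 0) := by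
  simp only [uB, List.count_append]
  by_cases h2 : j + 1 = i
  · subst h2
    simp only [Nat.add_sub_cancel]
    split_ifs <;> simp [List.count_nil] <;> omega
  · split_ifs <;> simp_all [List.count_nil] <;> omega

lemma count_eq (array : List Int) (i : Nat) :
    (((List.range array.length).flatMap (uA array)).count i : Int)
      = (((List.range (array.length - 1)).flatMap (uB array)).count i : Int) := by
  have key : ((List.range array.length).flatMap (uA array)).count i
      = ((List.range (array.length - 1)).flatMap (uB array)).count i := by
    rw [List.count_flatMap, List.count_flatMap]
    simp only [Function.comp_def, count_uA, count_uB]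
    rw [List.sum_map_add, sum_map_point, sum_map_point, sum_map_point']
    by_cases L : array.getD (i - 1) 0 < array.getD i 0 <;>
      by_cases R : array.getD (i + 1) 0 < array.getD i 0 <;>
        simp [L, R] <;> split_ifs <;> omega
  exact_mod_cast key

-- ===== VERDICT (by name: the statement is the Claim_ definition above) =====
theorem solution_spec : Claim_equal_solution := by
  intro array _
  unfold Spec_solution
  rw [solution_eq_foldl, alt_eq_foldl]
  have hA : ∀ j ∈ (List.range array.length).flatMap (uA array),
      j < (List.replicate array.length (1:Int)).length := by
    intro j hj
    simp only [List.mem_flatMap, List.mem_range] at hj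
    obtain ⟨x, hx, hj⟩ := hj
    have := mem_uA array x j hj
    simp only [List.length_replicate]; omega
  have hB : ∀ j ∈ (List.range (array.length - 1)).flatMap (uB array),
      j < (List.replicate array.length (1:Int)).length := by
    intro j hj
    simp only [List.mem_flatMap, List.mem_range] at hj
    obtain ⟨x, hx, hj⟩ := hj
    have := mem_uB array x j hj
    simp only [List.length_replicate]; omega
  apply List.ext_getElem
  · simp [length_foldl_pinc]
  · intro i h1 h2
    rw [← List.getD_eq_getElem _ 0, ← List.getD_eq_getElem _ 0]
    rw [getD_foldl_pinc _ _ _ hA, getD_foldl_pinc _ _ _ hB]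
    rw [count_eq array i]
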